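-- pv_equiv track=rewrite | github.com/R2bEEaton/Advent-of-Code | 2025/code/10a.py | getFewest
-- ===== SOURCE A (Python) =====
-- import heapq
--
-- def getFewest(curr, goal, buttons):
--     pq = []
--
--     # Originally ran without the seen set, but added it right after and saw a massive speedup so I kept it thinking I'd need it in Part Two
--     seen = set()
--     heapq.heappush(pq, (0, curr))
--
--     while True:
--         presses, curr = heapq.heappop(pq)
--         if curr not in seen:
--             seen.add(curr)
--         else:
--             continue
--         for seq in buttons:
--             # Was originally using tuples, but switched to bitwise operations for speed
--             new_curr = curr ^ seq
--             if new_curr == goal: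
--                 return presses + 1
--             heapq.heappush(pq, (presses + 1, new_curr))
-- ===== SOURCE B (Python) =====
-- def getFewest(curr, goal, buttons):
--     # Layered breadth-first search on XOR states: expand the whole frontier one
--     # press at a time; the first layer containing the goal gives the answer.
--     frontier = {curr}
--     presses = 0
--     while True:
--         frontier = {v ^ b for v in frontier for b in buttons}
--         presses += 1
--         if goal in frontier:
--             return presses
-- ===== Notes on version B (the rewrite author's own statement) =====
-- stated objective: simpler
-- what changed: A runs Dijkstra with a heapq priority queue and a visited set over XOR states; B replaces all of that by a layered breadth-first expansion of the whole frontier as a set, one press per layer, returning the index of the first layer containing the goal.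
-- outside the precondition, e.g. on getFewest(0, 1, [2]): A raises IndexError, B does not finish within the time limit; on getFewest(0, 0, []): A raises IndexError, B does not finish within the time limit
import Mathlib
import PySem

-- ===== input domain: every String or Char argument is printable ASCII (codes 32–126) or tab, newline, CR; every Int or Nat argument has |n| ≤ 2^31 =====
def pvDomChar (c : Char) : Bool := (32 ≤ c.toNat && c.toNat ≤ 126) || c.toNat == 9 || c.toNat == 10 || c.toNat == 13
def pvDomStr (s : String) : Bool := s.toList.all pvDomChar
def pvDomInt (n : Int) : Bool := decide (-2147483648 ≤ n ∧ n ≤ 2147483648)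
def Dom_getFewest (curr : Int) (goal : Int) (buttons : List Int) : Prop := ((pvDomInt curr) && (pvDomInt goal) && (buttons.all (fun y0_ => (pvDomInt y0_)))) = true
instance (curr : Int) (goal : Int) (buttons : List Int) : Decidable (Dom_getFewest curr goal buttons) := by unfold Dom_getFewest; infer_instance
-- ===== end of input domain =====

-- B replaces A's heap-based Dijkstra (priority queue + visited set) by a layered
-- breadth-first expansion of the whole frontier set, one press per layer: same
-- return value on every input where A returns (objective: simpler).

-- ===== PORT A =====
-- heapq is modelled as a multiset: push = append, pop = remove the (presses, value)
-- lexicographic minimum — exactly the element heappop returns.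
def pvPopMin : List (Int × Int) → Option ((Int × Int) × List (Int × Int))
  | [] => none
  | e :: tl =>
    match pvPopMin tl with
    | none => some (e, [])
    | some (m, tl') =>
      if e.1 < m.1 ∨ (e.1 = m.1 ∧ e.2 ≤ m.2) then some (e, tl) else some (m, e :: tl')

-- the inner `for seq in buttons` loop: push (presses+1, curr^seq) until a button hits goal
def pvPress (goal : Int) (presses : Int) (v : Int) : List Int → List (Int × Int) → Sum Int (List (Int × Int))
  | [], acc => .inr acc
  | b :: bs, acc =>
    if PySem.Int.bxor v b = goal then .inl (presses + 1)
    else pvPress goal presses v bs (acc ++ [(presses + 1, PySem.Int.bxor v b)])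

-- the `while True` loop, with fuel (the loop terminates on every input Pre_ admits;
-- `none` = fuel exhausted or heappop from an empty heap, both outside Pre_)
def pvLoopA (goal : Int) (buttons : List Int) : Nat → List (Int × Int) → PySem.Set Int → Option Int
  | 0, _, _ => none
  | fuel + 1, pq, seen =>
    match pvPopMin pq with
    | none => none
    | some ((presses, v), rest) =>
      if seen.contains v then pvLoopA goal buttons fuel rest seen
      else
        match pvPress goal presses v buttons [] with
        | .inl r => some r
        | .inr pushes => pvLoopA goal buttons fuel (rest ++ pushes) (seen.add v)

def getFewest (curr : Int) (goal : Int) (buttons : List Int) : Int :=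
  (pvLoopA goal buttons (2 + buttons.length * 2 ^ buttons.length) [(0, curr)] PySem.Set.empty).getD 0

-- ===== PORT B =====
-- layered BFS: expand the whole frontier by one press, return the first layer containing goal
def pvLoopB (goal : Int) (buttons : List Int) : Nat → PySem.Set Int → Int → Option Int
  | 0, _, _ => none
  | fuel + 1, frontier, presses =>
    let next : PySem.Set Int :=
      PySem.Set.ofList (frontier.flatMap (fun v => buttons.map (fun b => PySem.Int.bxor v b)))
    if next.contains goal then some (presses + 1)
    else pvLoopB goal buttons fuel next (presses + 1)

def getFewest_alt (curr : Int) (goal : Int) (buttons : List Int) : Int :=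
  (pvLoopB goal buttons (buttons.length + 2) (PySem.Set.ofList [curr]) 0).getD 0

-- ===== PRECONDITION & SPEC =====
-- all XOR-subset sums of buttons (the span of the button group); membership of
-- curr^goal in it is exactly "goal is reachable", i.e. exactly where Python A returns:
-- otherwise A's heap runs dry (IndexError) or, with buttons = [], it pops an empty heap.
def pvSpan (buttons : List Int) : List Int :=
  buttons.foldl (fun acc b => acc ++ acc.map (fun x => PySem.Int.bxor x b)) [0]

-- Pre_ excludes exactly the inputs where A raises IndexError (empty button list) or
-- loops forever / exhausts the heap (goal not in the XOR-span reachable from curr).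
def Pre_getFewest (curr : Int) (goal : Int) (buttons : List Int) : Prop :=
  buttons ≠ [] ∧ PySem.Int.bxor curr goal ∈ pvSpan buttons
instance (curr : Int) (goal : Int) (buttons : List Int) : Decidable (Pre_getFewest curr goal buttons) := by unfold Pre_getFewest; infer_instance

def pvWitness_getFewest : Int × Int × List Int := (0, 3, [1, 2])

def Spec_getFewest (curr : Int) (goal : Int) (buttons : List Int) (out : Int) : Prop := out = getFewest_alt curr goal buttons
instance (curr : Int) (goal : Int) (buttons : List Int) (out : Int) : Decidable (Spec_getFewest curr goal buttons out) := by unfold Spec_getFewest; infer_instance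

-- ===== CLAIM (what is proved, stated in full; the proofs are below) =====
def Claim_equal_getFewest : Prop := ∀ (curr : Int) (goal : Int) (buttons : List Int), Dom_getFewest curr goal buttons → Pre_getFewest curr goal buttons → Spec_getFewest curr goal buttons (getFewest curr goal buttons)

-- ===== LEMMAS AND PROOFS =====

def pvDec (s : Bool) (n : Nat) : Int := if s then -(n : Int) - 1 else n

theorem pvBxor_dec (s t : Bool) (m n : Nat) :
    PySem.Int.bxor (pvDec s m) (pvDec t n) = pvDec (s.xor t) (m ^^^ n) := by
  cases s <;> cases t <;>
    simp [pvDec, PySem.Int.bxor] <;>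
    omega

theorem pvDec_surj (a : Int) : ∃ s n, a = pvDec s n := by
  by_cases h : 0 ≤ a
  · exact ⟨false, a.toNat, by simp [pvDec]; omega⟩
  · exact ⟨true, (-a - 1).toNat, by simp [pvDec]; omega⟩

theorem pvBxor_assoc (a b c : Int) :
    PySem.Int.bxor (PySem.Int.bxor a b) c = PySem.Int.bxor a (PySem.Int.bxor b c) := by
  obtain ⟨s, m, rfl⟩ := pvDec_surj a
  obtain ⟨t, n, rfl⟩ := pvDec_surj b
  obtain ⟨u, k, rfl⟩ := pvDec_surj c
  simp [pvBxor_dec, Nat.xor_assoc]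

theorem pvBxor_cancel (a b : Int) : PySem.Int.bxor (PySem.Int.bxor a b) b = a := by
  rw [pvBxor_assoc, PySem.Int.bxor_self, PySem.Int.bxor_zero]

theorem pvBxor_right_comm (a b c : Int) :
    PySem.Int.bxor (PySem.Int.bxor a b) c = PySem.Int.bxor (PySem.Int.bxor a c) b := by
  rw [pvBxor_assoc, pvBxor_assoc, PySem.Int.bxor_comm b c]

theorem pvBxor_zero_left (a : Int) : PySem.Int.bxor 0 a = a := by
  rw [PySem.Int.bxor_comm, PySem.Int.bxor_zero]


def pvStep (buttons : List Int) (S : Set Int) : Set Int :=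
  {w | ∃ v ∈ S, ∃ b ∈ buttons, w = PySem.Int.bxor v b}

def pvRk (buttons : List Int) (v : Int) (k : Nat) : Set Int := (pvStep buttons)^[k] {v}

theorem pvRk_succ_front (buttons : List Int) (v : Int) (k : Nat) :
    pvRk buttons v (k + 1) = pvStep buttons (pvRk buttons v k) :=
  Function.iterate_succ_apply' _ _ _

theorem pvRk_decomp (buttons : List Int) : ∀ (k : Nat) (S : Set Int) (w : Int),
    w ∈ (pvStep buttons)^[k] S ↔ ∃ v ∈ S, w ∈ pvRk buttons v k := by
  intro k
  induction k with
  | zero => intro S w; simp [pvRk]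
  | succ k ih =>
    intro S w
    rw [Function.iterate_succ_apply]
    rw [ih]
    constructor
    · rintro ⟨u, hu, hw⟩
      obtain ⟨v, hv, b, hb, rfl⟩ := hu
      refine ⟨v, hv, ?_⟩
      rw [pvRk, Function.iterate_succ_apply, ih]
      exact ⟨PySem.Int.bxor v b, ⟨v, rfl, b, hb, rfl⟩, hw⟩
    · rintro ⟨v, hv, hw⟩
      rw [pvRk, Function.iterate_succ_apply, ih] at hw
      obtain ⟨u, hu, hw⟩ := hw
      obtain ⟨v', hv', b, hb, rfl⟩ := hu
      have hv'' : v' = v := hv'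
      exact ⟨PySem.Int.bxor v' b, ⟨v', by rw [hv'']; exact hv, b, hb, rfl⟩, hw⟩

theorem pvRk_succ_back (buttons : List Int) (v : Int) (k : Nat) (w : Int) :
    w ∈ pvRk buttons v (k + 1) ↔ ∃ b ∈ buttons, w ∈ pvRk buttons (PySem.Int.bxor v b) k := by
  rw [pvRk, Function.iterate_succ_apply, pvRk_decomp]
  constructor
  · rintro ⟨u, ⟨v', hv', b, hb, rfl⟩, hw⟩
    simp only [Set.mem_singleton_iff] at hv'; subst hv'
    exact ⟨b, hb, hw⟩
  · rintro ⟨b, hb, hw⟩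
    exact ⟨PySem.Int.bxor v b, ⟨v, rfl, b, hb, rfl⟩, hw⟩

theorem pvRk_compose (buttons : List Int) {v u w : Int} {i j : Nat}
    (h1 : u ∈ pvRk buttons v i) (h2 : w ∈ pvRk buttons u j) : w ∈ pvRk buttons v (j + i) := by
  rw [pvRk, Function.iterate_add_apply, pvRk_decomp]
  exact ⟨u, h1, h2⟩


theorem pvRk_single (buttons : List Int) {b : Int} (hb : b ∈ buttons) (v : Int) :
    PySem.Int.bxor v b ∈ pvRk buttons v 1 := by
  rw [pvRk_succ_front]
  exact ⟨v, rfl, b, hb, rfl⟩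
theorem pvSpan_foldl_acc_sub : ∀ (bs : List Int) (acc : List Int),
    acc ⊆ bs.foldl (fun a b => a ++ a.map (fun x => PySem.Int.bxor x b)) acc := by
  intro bs
  induction bs with
  | nil => intro acc x hx; exact hx
  | cons b bs ih =>
    intro acc x hx
    simp only [List.foldl_cons]
    exact ih _ (List.mem_append_left _ hx)

theorem pvZero_mem_span (buttons : List Int) : 0 ∈ pvSpan buttons :=
  pvSpan_foldl_acc_sub buttons [0] (by simp)

theorem pvSpan_foldl_length : ∀ (bs : List Int) (acc : List Int),
    (bs.foldl (fun a b => a ++ a.map (fun x => PySem.Int.bxor x b)) acc).length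
      = acc.length * 2 ^ bs.length := by
  intro bs
  induction bs with
  | nil => intro acc; simp
  | cons b bs ih =>
    intro acc
    simp only [List.foldl_cons]
    rw [ih]
    simp [List.length_append]
    ring

theorem pvSpan_length (buttons : List Int) : (pvSpan buttons).length = 2 ^ buttons.length := by
  have := pvSpan_foldl_length buttons [0]
  simpa [pvSpan] using this

-- closure of the span under xor with any button
theorem pvSpan_foldl_closed_pres (c : Int) : ∀ (bs : List Int) (acc : List Int),
    (∀ x ∈ acc, PySem.Int.bxor x c ∈ acc) →
    ∀ x ∈ bs.foldl (fun a b => a ++ a.map (fun y => PySem.Int.bxor y b)) acc,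
      PySem.Int.bxor x c ∈ bs.foldl (fun a b => a ++ a.map (fun y => PySem.Int.bxor y b)) acc := by
  intro bs
  induction bs with
  | nil => intro acc h x hx; exact h x hx
  | cons b bs ih =>
    intro acc h
    simp only [List.foldl_cons]
    apply ih
    intro x hx
    rcases List.mem_append.1 hx with hx | hx
    · exact List.mem_append_left _ (h x hx)
    · obtain ⟨y, hy, rfl⟩ := List.mem_map.1 hx
      apply List.mem_append_right
      exact List.mem_map.2 ⟨PySem.Int.bxor y c, h y hy, (pvBxor_right_comm y b c).symm⟩

theorem pvSpan_step_closed (b : Int) (acc : List Int) :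
    ∀ x ∈ acc ++ acc.map (fun y => PySem.Int.bxor y b),
      PySem.Int.bxor x b ∈ acc ++ acc.map (fun y => PySem.Int.bxor y b) := by
  intro x hx
  rcases List.mem_append.1 hx with hx | hx
  · exact List.mem_append_right _ (List.mem_map.2 ⟨x, hx, rfl⟩)
  · obtain ⟨y, hy, rfl⟩ := List.mem_map.1 hx
    rw [pvBxor_cancel]
    exact List.mem_append_left _ hy

theorem pvSpan_closed (buttons : List Int) :
    ∀ b ∈ buttons, ∀ x ∈ pvSpan buttons, PySem.Int.bxor x b ∈ pvSpan buttons := by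
  suffices h : ∀ (bs : List Int) (acc : List Int), ∀ b ∈ bs,
      ∀ x ∈ bs.foldl (fun a c => a ++ a.map (fun y => PySem.Int.bxor y c)) acc,
        PySem.Int.bxor x b ∈ bs.foldl (fun a c => a ++ a.map (fun y => PySem.Int.bxor y c)) acc by
    intro b hb x hx; exact h buttons [0] b hb x hx
  intro bs
  induction bs with
  | nil => intro acc b hb; simp at hb
  | cons c bs ih =>
    intro acc b hb
    rcases List.mem_cons.1 hb with rfl | hb
    · simp only [List.foldl_cons]
      exact pvSpan_foldl_closed_pres b bs _ (pvSpan_step_closed b acc)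
    · simp only [List.foldl_cons]
      exact ih _ b hb
-- every span element is realised by a walk of at most buttons.length presses
theorem pvSpan_reach_aux (buttons : List Int) : ∀ (bs : List Int), (∀ b ∈ bs, b ∈ buttons) →
    ∀ (acc : List Int) (x : Int),
      x ∈ bs.foldl (fun a c => a ++ a.map (fun y => PySem.Int.bxor y c)) acc →
      ∃ x₀ ∈ acc, ∃ k ≤ bs.length, ∀ v : Int,
        PySem.Int.bxor v x ∈ pvRk buttons (PySem.Int.bxor v x₀) k := by
  intro bs
  induction bs with
  | nil =>
    intro _ acc x hx
    exact ⟨x, hx, 0, by simp, fun v => by simp [pvRk]⟩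
  | cons b bs ih =>
    intro hsub acc x hx
    simp only [List.foldl_cons] at hx
    obtain ⟨x₀, hx₀, k, hk, hreach⟩ := ih (fun c hc => hsub c (List.mem_cons_of_mem _ hc)) _ x hx
    rcases List.mem_append.1 hx₀ with h0 | h0
    · exact ⟨x₀, h0, k, Nat.le_succ_of_le hk, hreach⟩
    · obtain ⟨y, hy, rfl⟩ := List.mem_map.1 h0
      refine ⟨y, hy, k + 1, by simpa using Nat.succ_le_succ hk, fun v => ?_⟩
      have hb : b ∈ buttons := hsub b List.mem_cons_self
      have hstep : PySem.Int.bxor (PySem.Int.bxor v y) b ∈ pvRk buttons (PySem.Int.bxor v y) 1 :=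
        pvRk_single buttons hb _
      have : PySem.Int.bxor (PySem.Int.bxor v y) b = PySem.Int.bxor v (PySem.Int.bxor y b) :=
        pvBxor_assoc v y b
      rw [this] at hstep
      have := pvRk_compose buttons hstep (hreach v)
      simpa using this

theorem pvSpan_reach (buttons : List Int) {x : Int} (hx : x ∈ pvSpan buttons) (v : Int) :
    ∃ k ≤ buttons.length, PySem.Int.bxor v x ∈ pvRk buttons v k := by
  obtain ⟨x₀, hx₀, k, hk, hreach⟩ :=
    pvSpan_reach_aux buttons buttons (fun _ h => h) [0] x hx
  have h0 : x₀ = 0 := by simpa using hx₀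
  subst h0
  have := hreach v
  rw [PySem.Int.bxor_zero] at this
  exact ⟨k, hk, this⟩

-- the coset of curr under the span: every state the search can ever hold
def pvCoset (curr : Int) (buttons : List Int) : List Int :=
  (pvSpan buttons).map (fun x => PySem.Int.bxor curr x)

theorem pvCoset_curr (curr : Int) (buttons : List Int) : curr ∈ pvCoset curr buttons :=
  List.mem_map.2 ⟨0, pvZero_mem_span buttons, PySem.Int.bxor_zero curr⟩

theorem pvCoset_length (curr : Int) (buttons : List Int) :
    (pvCoset curr buttons).length = 2 ^ buttons.length := by
  simp [pvCoset, pvSpan_length]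

theorem pvCoset_closed {curr : Int} {buttons : List Int} {v b : Int}
    (hv : v ∈ pvCoset curr buttons) (hb : b ∈ buttons) :
    PySem.Int.bxor v b ∈ pvCoset curr buttons := by
  obtain ⟨x, hx, rfl⟩ := List.mem_map.1 hv
  exact List.mem_map.2 ⟨PySem.Int.bxor x b, pvSpan_closed buttons b hb x hx,
    (pvBxor_assoc curr x b).symm⟩

-- distance: least number of presses ≥ 1 taking v to goal
def pvWfin (goal : Int) (buttons : List Int) (v : Int) : Prop :=
  ∃ k, 1 ≤ k ∧ goal ∈ pvRk buttons v k

noncomputable def pvW (goal : Int) (buttons : List Int) (v : Int) : Nat :=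
  sInf {k | 1 ≤ k ∧ goal ∈ pvRk buttons v k}

theorem pvW_spec {goal : Int} {buttons : List Int} {v : Int} (h : pvWfin goal buttons v) :
    1 ≤ pvW goal buttons v ∧ goal ∈ pvRk buttons v (pvW goal buttons v) :=
  Nat.sInf_mem h

theorem pvW_le {goal : Int} {buttons : List Int} {v : Int} {k : Nat}
    (h1 : 1 ≤ k) (h2 : goal ∈ pvRk buttons v k) : pvW goal buttons v ≤ k :=
  Nat.sInf_le ⟨h1, h2⟩

-- reachability of goal from curr, with the bound used for B's fuel
theorem pvGoal_reach {curr goal : Int} {buttons : List Int}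
    (hne : buttons ≠ []) (hmem : PySem.Int.bxor curr goal ∈ pvSpan buttons) :
    ∃ m, 1 ≤ m ∧ m ≤ buttons.length + 2 ∧ goal ∈ pvRk buttons curr m := by
  obtain ⟨k, hk, hreach⟩ := pvSpan_reach buttons hmem curr
  have hgoal : PySem.Int.bxor curr (PySem.Int.bxor curr goal) = goal := by
    rw [← pvBxor_assoc, PySem.Int.bxor_self, pvBxor_zero_left]
  rw [hgoal] at hreach
  rcases Nat.eq_zero_or_pos k with rfl | hpos
  · -- goal = curr: press any button twice
    have hg : goal = curr := by simpa [pvRk] using hreach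
    obtain ⟨b, hb⟩ := List.exists_mem_of_ne_nil _ hne
    have h1 : PySem.Int.bxor curr b ∈ pvRk buttons curr 1 := pvRk_single buttons hb curr
    have h2 : PySem.Int.bxor (PySem.Int.bxor curr b) b ∈ pvRk buttons (PySem.Int.bxor curr b) 1 :=
      pvRk_single buttons hb _
    rw [pvBxor_cancel] at h2
    have := pvRk_compose buttons h1 h2
    exact ⟨2, by omega, by omega, by rw [hg]; simpa using this⟩
  · exact ⟨k, hpos, by omega, hreach⟩

theorem pvCoset_Wfin {curr goal : Int} {buttons : List Int}
    (hne : buttons ≠ []) (hmem : PySem.Int.bxor curr goal ∈ pvSpan buttons)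
    {v : Int} (hv : v ∈ pvCoset curr buttons) : pvWfin goal buttons v := by
  obtain ⟨x, hx, rfl⟩ := List.mem_map.1 hv
  obtain ⟨k, _, hback⟩ := pvSpan_reach buttons hx (PySem.Int.bxor curr x)
  rw [pvBxor_cancel] at hback
  obtain ⟨m, hm1, _, hgoal⟩ := pvGoal_reach hne hmem
  exact ⟨m + k, by omega, pvRk_compose buttons hback hgoal⟩

theorem pvW_curr_le {curr goal : Int} {buttons : List Int}
    (hne : buttons ≠ []) (hmem : PySem.Int.bxor curr goal ∈ pvSpan buttons) :
    pvW goal buttons curr ≤ buttons.length + 2 := by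
  obtain ⟨m, hm1, hm2, hgoal⟩ := pvGoal_reach hne hmem
  exact le_trans (pvW_le hm1 hgoal) hm2
-- Bellman facts for pvW
theorem pvW_one {goal : Int} {buttons : List Int} {v : Int}
    (h : ∃ b ∈ buttons, PySem.Int.bxor v b = goal) : pvW goal buttons v = 1 := by
  obtain ⟨b, hb, hbg⟩ := h
  have h1 : goal ∈ pvRk buttons v 1 := by rw [← hbg]; exact pvRk_single buttons hb v
  have := pvW_le (le_refl 1) h1
  have h2 : 1 ≤ pvW goal buttons v := (pvW_spec ⟨1, le_refl 1, h1⟩).1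
  omega

theorem pvW_two_le {goal : Int} {buttons : List Int} {v : Int}
    (hfin : pvWfin goal buttons v) (h : ∀ b ∈ buttons, PySem.Int.bxor v b ≠ goal) :
    2 ≤ pvW goal buttons v := by
  obtain ⟨h1, hmem⟩ := pvW_spec hfin
  rcases Nat.lt_or_ge (pvW goal buttons v) 2 with hlt | hge
  · exfalso
    have he : pvW goal buttons v = 1 := by omega
    rw [he] at hmem
    rw [show (1 : Nat) = 0 + 1 from rfl, pvRk_succ_back] at hmem
    obtain ⟨b, hb, hgb⟩ := hmem
    exact h b hb (by simpa [pvRk] using hgb.symm)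
  · exact hge

theorem pvW_le_succ {goal : Int} {buttons : List Int} {v b : Int}
    (hb : b ∈ buttons) (hfin : pvWfin goal buttons (PySem.Int.bxor v b)) :
    pvW goal buttons v ≤ pvW goal buttons (PySem.Int.bxor v b) + 1 := by
  obtain ⟨h1, hmem⟩ := pvW_spec hfin
  have hstep : PySem.Int.bxor v b ∈ pvRk buttons v 1 := pvRk_single buttons hb v
  have := pvRk_compose buttons hstep hmem
  exact pvW_le (by omega) this

theorem pvW_pred {goal : Int} {buttons : List Int} {v : Int}
    (hfin : pvWfin goal buttons v) (h2 : 2 ≤ pvW goal buttons v) :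
    ∃ b ∈ buttons, pvWfin goal buttons (PySem.Int.bxor v b) ∧
      pvW goal buttons (PySem.Int.bxor v b) ≤ pvW goal buttons v - 1 := by
  obtain ⟨h1, hmem⟩ := pvW_spec hfin
  obtain ⟨j, hj⟩ : ∃ j, pvW goal buttons v = j + 1 := ⟨pvW goal buttons v - 1, by omega⟩
  rw [hj, pvRk_succ_back] at hmem
  obtain ⟨b, hb, hgb⟩ := hmem
  have hj1 : 1 ≤ j := by omega
  exact ⟨b, hb, ⟨j, hj1, hgb⟩, by rw [hj]; exact Nat.le_trans (pvW_le hj1 hgb) (by omega)⟩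

-- minF: minimum of presses + distance over the heap, in (WithTop Int)
noncomputable def pvF (goal : Int) (buttons : List Int) (e : Int × Int) : WithTop Int :=
  ((e.1 + (pvW goal buttons e.2 : Int) : Int) : WithTop Int)

noncomputable def pvMinF (goal : Int) (buttons : List Int) (pq : List (Int × Int)) : WithTop Int :=
  (pq.map (pvF goal buttons)).foldr min ⊤

theorem pvFoldr_min_append (l₁ l₂ : List (WithTop Int)) :
    (l₁ ++ l₂).foldr min ⊤ = min (l₁.foldr min ⊤) (l₂.foldr min ⊤) := by
  induction l₁ with
  | nil => simp
  | cons a l ih => simp [ih, min_assoc]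

theorem pvMinF_append (goal : Int) (buttons : List Int) (l₁ l₂ : List (Int × Int)) :
    pvMinF goal buttons (l₁ ++ l₂) = min (pvMinF goal buttons l₁) (pvMinF goal buttons l₂) := by
  unfold pvMinF
  rw [List.map_append, pvFoldr_min_append]

theorem pvMinF_cons (goal : Int) (buttons : List Int) (e : Int × Int) (l : List (Int × Int)) :
    pvMinF goal buttons (e :: l) = min (pvF goal buttons e) (pvMinF goal buttons l) := by
  simp [pvMinF]

theorem pvMinF_le_of_mem {goal : Int} {buttons : List Int} {e : Int × Int} {l : List (Int × Int)}
    (h : e ∈ l) : pvMinF goal buttons l ≤ pvF goal buttons e := by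
  induction l with
  | nil => simp at h
  | cons a l ih =>
    rw [pvMinF_cons]
    rcases List.mem_cons.1 h with rfl | h
    · exact min_le_left _ _
    · exact le_trans (min_le_right _ _) (ih h)

theorem pvLe_minF {goal : Int} {buttons : List Int} {c : WithTop Int} {l : List (Int × Int)}
    (h : ∀ e ∈ l, c ≤ pvF goal buttons e) : c ≤ pvMinF goal buttons l := by
  induction l with
  | nil => simp [pvMinF]
  | cons a l ih =>
    rw [pvMinF_cons]
    exact le_min (h a List.mem_cons_self) (ih (fun e he => h e (List.mem_cons_of_mem _ he)))

theorem pvMinF_extract (goal : Int) (buttons : List Int) (l₁ l₂ : List (Int × Int)) (e : Int × Int) :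
    pvMinF goal buttons (l₁ ++ e :: l₂)
      = min (pvF goal buttons e) (pvMinF goal buttons (l₁ ++ l₂)) := by
  rw [pvMinF_append, pvMinF_cons, pvMinF_append]
  exact min_left_comm _ _ _

-- pvPopMin spec
theorem pvPopMin_eq_none {pq : List (Int × Int)} : pvPopMin pq = none ↔ pq = [] := by
  cases pq with
  | nil => simp [pvPopMin]
  | cons e tl =>
    simp only [pvPopMin]
    cases h : pvPopMin tl with
    | none => simp_all
    | some m =>
      obtain ⟨m, tl'⟩ := m
      constructor
      · intro hc
        by_cases hcond : e.1 < m.1 ∨ (e.1 = m.1 ∧ e.2 ≤ m.2) <;> simp [hcond] at hc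
      · intro hc; simp at hc

theorem pvPopMin_spec : ∀ {pq : List (Int × Int)} {m : Int × Int} {rest : List (Int × Int)},
    pvPopMin pq = some (m, rest) →
    (∃ l₁ l₂, pq = l₁ ++ m :: l₂ ∧ rest = l₁ ++ l₂) ∧ (∀ e ∈ pq, m.1 ≤ e.1) := by
  intro pq
  induction pq with
  | nil => intro m rest h; simp [pvPopMin] at h
  | cons e tl ih =>
    intro m rest h
    simp only [pvPopMin] at h
    cases htl : pvPopMin tl with
    | none =>
      rw [htl] at h
      have htl0 : tl = [] := pvPopMin_eq_none.1 htl
      subst htl0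
      simp only [Option.some.injEq, Prod.mk.injEq] at h
      obtain ⟨h1, h2⟩ := h
      subst h1; subst h2
      exact ⟨⟨[], [], rfl, rfl⟩, by simp⟩
    | some p =>
      obtain ⟨m', tl'⟩ := p
      rw [htl] at h
      obtain ⟨⟨l₁, l₂, hdec, hrest⟩, hmin⟩ := ih htl
      by_cases hcond : e.1 < m'.1 ∨ (e.1 = m'.1 ∧ e.2 ≤ m'.2)
      · simp only [hcond, if_true, Option.some.injEq, Prod.mk.injEq] at h
        obtain ⟨h1, h2⟩ := h
        subst h1; subst h2
        refine ⟨⟨[], tl, rfl, rfl⟩, ?_⟩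
        intro f hf
        rcases List.mem_cons.1 hf with rfl | hf
        · exact le_refl _
        · have := hmin f hf
          rcases hcond with hlt | ⟨heq, _⟩ <;> omega
      · simp only [hcond, if_false, Option.some.injEq, Prod.mk.injEq] at h
        obtain ⟨h1, h2⟩ := h
        subst h1; subst h2
        refine ⟨⟨e :: l₁, l₂, by simp [hdec], by simp [hrest]⟩, ?_⟩
        intro f hf
        rcases List.mem_cons.1 hf with rfl | hf
        · omega
        · exact hmin f hf

-- pvPress spec
theorem pvPress_hit {goal presses v : Int} : ∀ {bs : List Int} (acc : List (Int × Int)),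
    (∃ b ∈ bs, PySem.Int.bxor v b = goal) →
    pvPress goal presses v bs acc = .inl (presses + 1) := by
  intro bs
  induction bs with
  | nil => intro acc h; simp at h
  | cons b bs ih =>
    intro acc h
    by_cases hb : PySem.Int.bxor v b = goal
    · simp [pvPress, hb]
    · have : ∃ c ∈ bs, PySem.Int.bxor v c = goal := by
        obtain ⟨c, hc, hcg⟩ := h
        rcases List.mem_cons.1 hc with rfl | hc
        · exact absurd hcg hb
        · exact ⟨c, hc, hcg⟩
      simp only [pvPress, hb, if_false]
      exact ih _ this

theorem pvPress_miss {goal presses v : Int} : ∀ {bs : List Int} (acc : List (Int × Int)),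
    (∀ b ∈ bs, PySem.Int.bxor v b ≠ goal) →
    pvPress goal presses v bs acc
      = .inr (acc ++ bs.map (fun b => (presses + 1, PySem.Int.bxor v b))) := by
  intro bs
  induction bs with
  | nil => intro acc h; simp [pvPress]
  | cons b bs ih =>
    intro acc h
    have hb := h b List.mem_cons_self
    simp only [pvPress, hb, if_false]
    rw [ih _ (fun c hc => h c (List.mem_cons_of_mem _ hc))]
    simp
-- the Dijkstra loop invariant
def pvINV (curr goal : Int) (buttons : List Int) (pq : List (Int × Int)) (seen : List Int) : Prop :=
  (∀ e ∈ pq, e.2 ∈ pvCoset curr buttons) ∧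
  seen.Nodup ∧
  (∀ w ∈ seen, w ∈ pvCoset curr buttons ∧ ∀ b ∈ buttons, PySem.Int.bxor w b ≠ goal ∧
     (PySem.Int.bxor w b ∈ seen ∨ (PySem.Int.bxor w b ∉ seen ∧
       ∃ p, (p, PySem.Int.bxor w b) ∈ pq ∧ ∀ e ∈ pq, p ≤ e.1 + 1)))

def pvPhi (buttons : List Int) (pq : List (Int × Int)) (seen : List Int) : Nat :=
  pq.length + buttons.length * (2 ^ buttons.length - seen.length)

-- from a seen vertex, follow a shortest-path edge through the seen set until an
-- unseen heap entry is found; it is at most as promising as the seen vertex was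
theorem pvChain {curr goal : Int} {buttons : List Int} (hne : buttons ≠ [])
    (hmem : PySem.Int.bxor curr goal ∈ pvSpan buttons)
    {pq : List (Int × Int)} {seen : List Int}
    (hINV : pvINV curr goal buttons pq seen)
    {p₀ v₀ : Int} (hp₀ : (p₀, v₀) ∈ pq) :
    ∀ (n : Nat) (w : Int), w ∈ seen → pvW goal buttons w ≤ n →
    ∃ p u, (p, u) ∈ pq ∧ u ∉ seen ∧
      p + (pvW goal buttons u : Int) ≤ p₀ + (pvW goal buttons w : Int) := by
  obtain ⟨hpq, hnd, hseen⟩ := hINV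
  intro n
  induction n with
  | zero =>
    intro w hw hn
    have hwfin := pvCoset_Wfin hne hmem (hseen w hw).1
    have h2 := pvW_two_le hwfin (fun b hb => ((hseen w hw).2 b hb).1)
    omega
  | succ n ih =>
    intro w hw hn
    have hwfin := pvCoset_Wfin hne hmem (hseen w hw).1
    have h2 := pvW_two_le hwfin (fun b hb => ((hseen w hw).2 b hb).1)
    obtain ⟨b, hb, hbfin, hble⟩ := pvW_pred hwfin h2
    rcases ((hseen w hw).2 b hb).2 with hin | ⟨hnin, p, hpmem, hbound⟩
    · have hn' : pvW goal buttons (PySem.Int.bxor w b) ≤ n := by omega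
      obtain ⟨p, u, h1, h2', h3⟩ := ih _ hin hn'
      refine ⟨p, u, h1, h2', ?_⟩
      have hc : (pvW goal buttons (PySem.Int.bxor w b) : Int) + 1 ≤ (pvW goal buttons w : Int) := by
        exact_mod_cast (by omega : pvW goal buttons (PySem.Int.bxor w b) + 1 ≤ pvW goal buttons w)
      omega
    · have hple : p ≤ p₀ + 1 := by
        have := hbound _ hp₀
        simpa using this
      refine ⟨p, PySem.Int.bxor w b, hpmem, hnin, ?_⟩
      have hc : (pvW goal buttons (PySem.Int.bxor w b) : Int) + 1 ≤ (pvW goal buttons w : Int) := by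
        exact_mod_cast (by omega : pvW goal buttons (PySem.Int.bxor w b) + 1 ≤ pvW goal buttons w)
      omega
theorem pvNodup_subset_length {l l' : List Int} (hnd : l.Nodup) (hsub : ∀ x ∈ l, x ∈ l') :
    l.length ≤ l'.length := by
  calc l.length = l.toFinset.card := (List.toFinset_card_of_nodup hnd).symm
    _ ≤ l'.toFinset.card := Finset.card_le_card (fun x hx => by
        rw [List.mem_toFinset] at *
        exact hsub x (by simpa using hx))
    _ ≤ l'.length := l'.toFinset_card_le

theorem pvLoopA_correct {curr goal : Int} {buttons : List Int} (hne : buttons ≠ [])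
    (hmem : PySem.Int.bxor curr goal ∈ pvSpan buttons) :
    ∀ (fuel : Nat) (pq : List (Int × Int)) (seen : PySem.Set Int),
      pvINV curr goal buttons pq seen → pq ≠ [] →
      pvPhi buttons pq seen < fuel →
      ∃ r : Int, pvLoopA goal buttons fuel pq seen = some r ∧
        (r : WithTop Int) = pvMinF goal buttons pq := by
  intro fuel
  induction fuel with
  | zero => intro pq seen _ _ hphi; omega
  | succ fuel ih =>
    intro pq seen hINV hpqne hphi
    obtain ⟨⟨p₀, v₀⟩, rest, hpop⟩ :
        ∃ m rest, pvPopMin pq = some (m, rest) := by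
      cases h : pvPopMin pq with
      | none => exact absurd (pvPopMin_eq_none.1 h) hpqne
      | some x => obtain ⟨m, r⟩ := x; exact ⟨m, r, rfl⟩
    obtain ⟨⟨l₁, l₂, hdec, hrest⟩, hmin⟩ := pvPopMin_spec hpop
    have hp₀mem : (p₀, v₀) ∈ pq := by rw [hdec]; simp
    obtain ⟨hpq, hnd, hseen⟩ := hINV
    have hv₀coset : v₀ ∈ pvCoset curr buttons := hpq _ hp₀mem
    have hrestsub : ∀ e ∈ rest, e ∈ pq := by
      intro e he
      rw [hrest] at he
      rw [hdec]
      rcases List.mem_append.1 he with h | h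
      · exact List.mem_append_left _ h
      · exact List.mem_append_right _ (List.mem_cons_of_mem _ h)
    have hlenrest : rest.length + 1 = pq.length := by
      rw [hdec, hrest]; simp only [List.length_append, List.length_cons]; omega
    have hminF_pq : pvMinF goal buttons pq
        = min (pvF goal buttons (p₀, v₀)) (pvMinF goal buttons rest) := by
      rw [hdec, hrest, pvMinF_extract]
    cases hcont : PySem.Set.contains seen v₀ with
    | true =>
      -- v₀ already expanded: skip it
      have hv₀seen : v₀ ∈ seen := (PySem.Set.contains_iff seen v₀).1 hcont
      obtain ⟨p, u, humem, hunin, hle⟩ :=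
        pvChain hne hmem ⟨hpq, hnd, hseen⟩ hp₀mem (pvW goal buttons v₀) v₀ hv₀seen (le_refl _)
      have huv₀ : u ≠ v₀ := fun h => hunin (h ▸ hv₀seen)
      have humem' : (p, u) ∈ rest := by
        rw [hdec] at humem
        rw [hrest]
        rcases List.mem_append.1 humem with h | h
        · exact List.mem_append_left _ h
        · rcases List.mem_cons.1 h with h | h
          · exact absurd (congrArg Prod.snd h) (by simpa using huv₀)
          · exact List.mem_append_right _ h
      have hrestne : rest ≠ [] := List.ne_nil_of_mem humem'
      have hINV' : pvINV curr goal buttons rest seen := by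
        refine ⟨fun e he => hpq e (hrestsub e he), hnd, fun w hw => ?_⟩
        refine ⟨(hseen w hw).1, fun b hb => ?_⟩
        refine ⟨((hseen w hw).2 b hb).1, ?_⟩
        rcases ((hseen w hw).2 b hb).2 with h | ⟨hnin, q, hq, hbd⟩
        · exact Or.inl h
        · refine Or.inr ⟨hnin, q, ?_, fun e he => hbd e (hrestsub e he)⟩
          have hqv : PySem.Int.bxor w b ≠ v₀ := fun h => hnin (h ▸ hv₀seen)
          rw [hdec] at hq
          rw [hrest]
          rcases List.mem_append.1 hq with h | h
          · exact List.mem_append_left _ h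
          · rcases List.mem_cons.1 h with h | h
            · exact absurd (congrArg Prod.snd h) (by simpa using hqv)
            · exact List.mem_append_right _ h
      have hphi' : pvPhi buttons rest seen < fuel := by
        unfold pvPhi at *
        omega
      obtain ⟨r, hr, hrv⟩ := ih rest seen hINV' hrestne hphi'
      refine ⟨r, ?_, ?_⟩
      · simp only [pvLoopA, hpop, hcont, if_true]
        exact hr
      · rw [hrv, hminF_pq]
        rw [min_eq_right]
        calc pvMinF goal buttons rest ≤ pvF goal buttons (p, u) := pvMinF_le_of_mem humem'
          _ ≤ pvF goal buttons (p₀, v₀) := by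
              simp only [pvF]
              exact_mod_cast hle
    | false =>
      have hv₀nin : v₀ ∉ seen := by
        intro h
        rw [← PySem.Set.contains_iff seen v₀] at h
        rw [h] at hcont
        exact Bool.noConfusion hcont
      have hWv₀fin : pvWfin goal buttons v₀ := pvCoset_Wfin hne hmem hv₀coset
      by_cases hhit : ∃ b ∈ buttons, PySem.Int.bxor v₀ b = goal
      · -- a button reaches goal directly: the Python returns presses + 1
        have hW1 : pvW goal buttons v₀ = 1 := pvW_one hhit
        refine ⟨p₀ + 1, ?_, ?_⟩
        · simp only [pvLoopA, hpop, hcont, Bool.false_eq_true, if_false]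
          rw [pvPress_hit [] hhit]
        · have hle1 : pvMinF goal buttons pq ≤ ((p₀ + 1 : Int) : WithTop Int) := by
            have := pvMinF_le_of_mem (goal := goal) (buttons := buttons) hp₀mem
            rw [pvF] at this
            simpa [hW1] using this
          have hle2 : ((p₀ + 1 : Int) : WithTop Int) ≤ pvMinF goal buttons pq := by
            apply pvLe_minF
            intro e he
            have he1 : p₀ ≤ e.1 := hmin e he
            have he2 : 1 ≤ pvW goal buttons e.2 :=
              (pvW_spec (pvCoset_Wfin hne hmem (hpq e he))).1
            rw [pvF]
            rw [WithTop.coe_le_coe]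
            have : (1 : Int) ≤ (pvW goal buttons e.2 : Int) := by exact_mod_cast he2
            omega
          exact le_antisymm hle2 hle1
      · -- expand v₀: push all neighbours
        replace hhit : ∀ b ∈ buttons, PySem.Int.bxor v₀ b ≠ goal :=
          fun b hb h => hhit ⟨b, hb, h⟩
        have hWv₀2 : 2 ≤ pvW goal buttons v₀ := pvW_two_le hWv₀fin hhit
        set pushes := buttons.map (fun b => (p₀ + 1, PySem.Int.bxor v₀ b)) with hpushes
        have hpushne : pushes ≠ [] := by
          simp [hpushes]
          exact hne
        have hpq'ne : rest ++ pushes ≠ [] := by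
          intro h
          exact hpushne (List.append_eq_nil_iff.1 h).2
        have hseenadd : ∀ x, x ∈ PySem.Set.add seen v₀ ↔ x ∈ seen ∨ x = v₀ :=
          fun x => PySem.Set.mem_add seen v₀ x
        have haddlen : (PySem.Set.add seen v₀).length = seen.length + 1 := by
          simp [PySem.Set.add, hv₀nin]
        have hINV' : pvINV curr goal buttons (rest ++ pushes) (PySem.Set.add seen v₀) := by
          refine ⟨?_, PySem.Set.nodup_add seen v₀ hnd, ?_⟩
          · intro e he
            rcases List.mem_append.1 he with h | h
            · exact hpq e (hrestsub e h)
            · obtain ⟨b, hb, rfl⟩ := List.mem_map.1 h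
              exact pvCoset_closed hv₀coset hb
          · intro w hw
            rcases (hseenadd w).1 hw with hw' | rfl
            · -- old seen vertex
              refine ⟨(hseen w hw').1, fun b hb => ?_⟩
              refine ⟨((hseen w hw').2 b hb).1, ?_⟩
              rcases ((hseen w hw').2 b hb).2 with h | ⟨hnin, q, hq, hbd⟩
              · exact Or.inl ((hseenadd _).2 (Or.inl h))
              · by_cases hv : PySem.Int.bxor w b = v₀
                · exact Or.inl ((hseenadd _).2 (Or.inr hv))
                · refine Or.inr ⟨fun h => ?_, q, ?_, ?_⟩
                  · rcases (hseenadd _).1 h with h | h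
                    · exact hnin h
                    · exact hv h
                  · apply List.mem_append_left
                    rw [hdec] at hq
                    rw [hrest]
                    rcases List.mem_append.1 hq with h | h
                    · exact List.mem_append_left _ h
                    · rcases List.mem_cons.1 h with h | h
                      · exact absurd (congrArg Prod.snd h) (by simpa using hv)
                      · exact List.mem_append_right _ h
                  · intro e he
                    rcases List.mem_append.1 he with h | h
                    · exact hbd e (hrestsub e h)
                    · obtain ⟨b', hb', rfl⟩ := List.mem_map.1 h
                      have := hbd _ hp₀mem
                      simp only at this ⊢
                      omega
            · -- w = v₀, the freshly expanded vertex
              refine ⟨hv₀coset, fun b hb => ?_⟩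
              refine ⟨hhit b hb, ?_⟩
              by_cases hv : PySem.Int.bxor w b ∈ PySem.Set.add seen w
              · exact Or.inl hv
              · refine Or.inr ⟨hv, p₀ + 1, ?_, ?_⟩
                · exact List.mem_append_right _ (List.mem_map.2 ⟨b, hb, rfl⟩)
                · intro e he
                  rcases List.mem_append.1 he with h | h
                  · have := hmin e (hrestsub e h)
                    omega
                  · obtain ⟨b', hb', rfl⟩ := List.mem_map.1 h
                    simp only
                    omega
        have hseenlen : seen.length + 1 ≤ 2 ^ buttons.length := by
          have hnd' : (PySem.Set.add seen v₀).Nodup := PySem.Set.nodup_add seen v₀ hnd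
          have hsub : ∀ x ∈ PySem.Set.add seen v₀, x ∈ pvCoset curr buttons := by
            intro x hx
            rcases (hseenadd x).1 hx with h | rfl
            · exact (hseen x h).1
            · exact hv₀coset
          have := pvNodup_subset_length hnd' hsub
          rw [haddlen, pvCoset_length] at this
          exact this
        have hphi' : pvPhi buttons (rest ++ pushes) (PySem.Set.add seen v₀) < fuel := by
          unfold pvPhi at *
          rw [List.length_append, haddlen]
          have hplen : pushes.length = buttons.length := by simp [hpushes]
          rw [hplen]
          have hx : 2 ^ buttons.length - seen.length
              = (2 ^ buttons.length - (seen.length + 1)) + 1 := by omega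
          have hmul : buttons.length * (2 ^ buttons.length - seen.length)
              = buttons.length * (2 ^ buttons.length - (seen.length + 1)) + buttons.length := by
            rw [hx, Nat.mul_add, Nat.mul_one]
          omega
        obtain ⟨r, hr, hrv⟩ := ih (rest ++ pushes) (PySem.Set.add seen v₀) hINV' hpq'ne hphi'
        refine ⟨r, ?_, ?_⟩
        · simp only [pvLoopA, hpop, hcont, Bool.false_eq_true, if_false]
          rw [pvPress_miss [] hhit]
          simpa using hr
        · -- value preservation: minF (rest ++ pushes) = minF pq
          have hkey : pvMinF goal buttons pushes = pvF goal buttons (p₀, v₀) := by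
            apply le_antisymm
            · obtain ⟨b, hb, hbfin, hble⟩ := pvW_pred hWv₀fin hWv₀2
              have hmem' : (p₀ + 1, PySem.Int.bxor v₀ b) ∈ pushes :=
                List.mem_map.2 ⟨b, hb, rfl⟩
              calc pvMinF goal buttons pushes
                  ≤ pvF goal buttons (p₀ + 1, PySem.Int.bxor v₀ b) := pvMinF_le_of_mem hmem'
                _ ≤ pvF goal buttons (p₀, v₀) := by
                    simp only [pvF]
                    rw [WithTop.coe_le_coe]
                    have : (pvW goal buttons (PySem.Int.bxor v₀ b) : Int) + 1
                        ≤ (pvW goal buttons v₀ : Int) := by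
                      exact_mod_cast (by omega :
                        pvW goal buttons (PySem.Int.bxor v₀ b) + 1 ≤ pvW goal buttons v₀)
                    omega
            · apply pvLe_minF
              intro e he
              obtain ⟨b, hb, rfl⟩ := List.mem_map.1 he
              simp only [pvF]
              rw [WithTop.coe_le_coe]
              have hfin' : pvWfin goal buttons (PySem.Int.bxor v₀ b) :=
                pvCoset_Wfin hne hmem (pvCoset_closed hv₀coset hb)
              have h1 := pvW_le_succ hb hfin'
              have h2 : (pvW goal buttons v₀ : Int)
                  ≤ (pvW goal buttons (PySem.Int.bxor v₀ b) : Int) + 1 := by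
                exact_mod_cast h1
              omega
          rw [hrv, pvMinF_append, hkey, hminF_pq, min_comm]
theorem pvLoopB_correct {curr goal : Int} {buttons : List Int}
    (hfin : pvWfin goal buttons curr) :
    ∀ (fuel k : Nat) (frontier : PySem.Set Int),
      (∀ x, x ∈ frontier ↔ x ∈ pvRk buttons curr k) →
      (∀ j, 1 ≤ j → j ≤ k → goal ∉ pvRk buttons curr j) →
      pvW goal buttons curr ≤ k + fuel →
      pvLoopB goal buttons fuel frontier (k : Int)
        = some ((pvW goal buttons curr : Int)) := by
  intro fuel
  induction fuel with
  | zero =>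
    intro k frontier _ hmiss hfuel
    obtain ⟨h1, h2⟩ := pvW_spec hfin
    exact absurd h2 (hmiss _ h1 (by omega))
  | succ fuel ih =>
    intro k frontier hfr hmiss hfuel
    have hnext : ∀ x,
        x ∈ PySem.Set.ofList
            (frontier.flatMap (fun v => buttons.map (fun b => PySem.Int.bxor v b)))
          ↔ x ∈ pvRk buttons curr (k + 1) := by
      intro x
      rw [PySem.Set.mem_ofList, List.mem_flatMap, pvRk_succ_front]
      constructor
      · rintro ⟨v, hv, hx⟩
        obtain ⟨b, hb, rfl⟩ := List.mem_map.1 hx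
        exact ⟨v, (hfr v).1 hv, b, hb, rfl⟩
      · rintro ⟨v, hv, b, hb, rfl⟩
        exact ⟨v, (hfr v).2 hv, List.mem_map.2 ⟨b, hb, rfl⟩⟩
    simp only [pvLoopB]
    cases hgc : PySem.Set.contains
        (PySem.Set.ofList
          (frontier.flatMap (fun v => buttons.map (fun b => PySem.Int.bxor v b)))) goal with
    | true =>
      have hgmem : goal ∈ pvRk buttons curr (k + 1) :=
        (hnext goal).1 ((PySem.Set.contains_iff _ goal).1 hgc)
      have hWle : pvW goal buttons curr ≤ k + 1 := pvW_le (by omega) hgmem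
      have hWgt : ¬ pvW goal buttons curr ≤ k := by
        intro hle
        obtain ⟨h1, h2⟩ := pvW_spec hfin
        exact hmiss _ h1 hle h2
      have hWeq : pvW goal buttons curr = k + 1 := by omega
      simp only [if_true]
      congr 1
      rw [hWeq]
      push_cast
      ring
    | false =>
      have hgnmem : goal ∉ pvRk buttons curr (k + 1) := by
        intro h
        have := (PySem.Set.contains_iff _ goal).2 ((hnext goal).2 h)
        rw [this] at hgc
        exact Bool.noConfusion hgc
      have hmiss' : ∀ j, 1 ≤ j → j ≤ k + 1 → goal ∉ pvRk buttons curr j := by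
        intro j h1 h2
        rcases Nat.lt_or_ge j (k + 1) with h | h
        · exact hmiss j h1 (by omega)
        · have : j = k + 1 := by omega
          rw [this]
          exact hgnmem
      simp only [Bool.false_eq_true, if_false]
      have := ih (k + 1) _ hnext hmiss' (by omega)
      rw [show ((k : Int) + 1) = (((k + 1 : Nat) : Int)) by push_cast; ring]
      exact this

theorem pvA_eq {curr goal : Int} {buttons : List Int} (hne : buttons ≠ [])
    (hmem : PySem.Int.bxor curr goal ∈ pvSpan buttons) :
    getFewest curr goal buttons = (pvW goal buttons curr : Int) := by
  unfold getFewest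
  have hINV0 : pvINV curr goal buttons [(0, curr)] PySem.Set.empty := by
    refine ⟨?_, List.nodup_nil, ?_⟩
    · intro e he
      simp only [List.mem_singleton] at he
      subst he
      exact pvCoset_curr curr buttons
    · intro w hw
      simp [PySem.Set.empty] at hw
  obtain ⟨r, hr, hrv⟩ := pvLoopA_correct hne hmem
    (2 + buttons.length * 2 ^ buttons.length) [(0, curr)] PySem.Set.empty hINV0
    (by simp) (by unfold pvPhi; simp [PySem.Set.empty])
  rw [hr]
  simp only [Option.getD_some]
  have hM : pvMinF goal buttons [(0, curr)]
      = ((0 + (pvW goal buttons curr : Int) : Int) : WithTop Int) := by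
    simp [pvMinF, pvF]
  rw [hM] at hrv
  have : r = 0 + (pvW goal buttons curr : Int) := WithTop.coe_inj.1 hrv
  omega

theorem pvB_eq {curr goal : Int} {buttons : List Int} (hne : buttons ≠ [])
    (hmem : PySem.Int.bxor curr goal ∈ pvSpan buttons) :
    getFewest_alt curr goal buttons = (pvW goal buttons curr : Int) := by
  unfold getFewest_alt
  have hfin : pvWfin goal buttons curr :=
    pvCoset_Wfin hne hmem (pvCoset_curr curr buttons)
  have hfr : ∀ x, x ∈ PySem.Set.ofList [curr] ↔ x ∈ pvRk buttons curr 0 := by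
    intro x
    rw [PySem.Set.mem_ofList]
    simp [pvRk]
  have h := pvLoopB_correct hfin (buttons.length + 2) 0 (PySem.Set.ofList [curr]) hfr
    (fun j h1 h2 => absurd (by omega : j = 0) (by omega)) 
    (by have := pvW_curr_le hne hmem; omega)
  rw [show ((0 : Nat) : Int) = (0 : Int) from rfl] at h
  rw [h]
  simp
theorem pvFinal : ∀ (curr goal : Int) (buttons : List Int),
    Pre_getFewest curr goal buttons →
    getFewest curr goal buttons = getFewest_alt curr goal buttons := by
  intro curr goal buttons ⟨hne, hmem⟩
  rw [pvA_eq hne hmem, pvB_eq hne hmem]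

-- ===== VERDICT (by name: the statement is the Claim_ definition above) =====
theorem getFewest_spec : Claim_equal_getFewest := by
  intro curr goal buttons _ hpre
  unfold Spec_getFewest
  exact pvFinal curr goal buttons hpre
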